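-- pv_equiv track=rewrite | github.com/anidotan/Boogle | ex12_utils.py | path_is_legal
-- ===== SOURCE A (Python) =====
-- def path_is_legal(path, board) -> bool:
--     """
--     check if a given path is legal - no tuple is outside the board, all tuples
--     are one next to the other and that there are no double tuples
--     :param path: list of tuples representing the path of given word
--     :param board: the game board - list of lists - so that we will measure its sizr
--     :return: True - if legal, False - if not
--     """
--     num_rows = len(board)
--     num_cols = len(board[0])
--
--     prev_col = None
--     prev_row = None
--
--     if are_there_duplicates(path):
--         return False
--     for cell_tuple in path:
--         cur_row, cur_col = cell_tuple
--         # check all cells are in the board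
--         if cur_row < 0 or cur_col < 0 or cur_row > num_rows - 1 or cur_col > num_cols - 1:
--             return False
--         if prev_row is not None:
--             if abs(cur_row-prev_row) > 1 or abs(cur_col - prev_col) > 1:
--                 return False
--         prev_row = cur_row
--         prev_col = cur_col
--     return True
--
-- def are_there_duplicates(given_list) -> bool:
--     """
--     checks if there are values that appear twice in a given list
--     :param given_list: the list
--     :return: True - if there is a double, False - if there isn't
--     """
--     there_are_double = False
--     list_as_set = set(given_list)
--     for item in given_list:
--         if item in list_as_set:
--             list_as_set.remove(item)
--         else:
--             there_are_double = True
--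
--     return there_are_double
-- ===== SOURCE B (Python) =====
-- def path_is_legal(path, board) -> bool:
--     num_rows = len(board)
--     num_cols = len(board[0])
--     visited = set()
--     prev = None
--     for r, c in path:
--         if (r, c) in visited:
--             return False
--         if not (0 <= r < num_rows and 0 <= c < num_cols):
--             return False
--         if prev is not None and (abs(r - prev[0]) > 1 or abs(c - prev[1]) > 1):
--             return False
--         visited.add((r, c))
--         prev = (r, c)
--     return True
-- ===== Notes on version B (the rewrite author's own statement) =====
-- stated objective: alternative
-- what changed: Replaces A's staged structure (a whole-list set-removal helper computing a duplicates flag, then a separate bounds/adjacency loop) with a single fused pass that maintains an incremental visited set and exits at the first offending cell.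
import Mathlib
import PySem

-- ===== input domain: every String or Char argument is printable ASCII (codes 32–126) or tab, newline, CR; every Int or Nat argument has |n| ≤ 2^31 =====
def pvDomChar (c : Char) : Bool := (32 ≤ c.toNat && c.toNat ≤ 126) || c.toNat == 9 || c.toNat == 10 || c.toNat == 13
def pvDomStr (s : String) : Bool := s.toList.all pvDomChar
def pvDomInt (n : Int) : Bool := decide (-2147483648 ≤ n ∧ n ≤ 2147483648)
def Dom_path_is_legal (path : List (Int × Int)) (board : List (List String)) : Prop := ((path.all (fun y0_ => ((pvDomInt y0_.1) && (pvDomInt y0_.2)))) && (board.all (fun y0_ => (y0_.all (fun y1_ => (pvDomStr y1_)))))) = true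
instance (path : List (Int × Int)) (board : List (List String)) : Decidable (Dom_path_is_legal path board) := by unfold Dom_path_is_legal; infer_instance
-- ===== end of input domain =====

-- B replaces A's staged structure (a whole-list set-removal duplicate helper, then a separate
-- bounds/adjacency loop) by ONE fused pass that maintains an incremental visited set and exits
-- at the first offending cell: a different decomposition with different maintained state, same cost.


-- ===== PORT A =====
-- helper are_there_duplicates: fold over the list with state (there_are_double, list_as_set).
-- 'list_as_set.remove(item)' is called only when 'item in list_as_set', where it equals Set.discard (exact).
def areThereDuplicates (givenList : List (Int × Int)) : Bool :=
  (givenList.foldl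
    (fun (st : Bool × PySem.Set (Int × Int)) item =>
      if PySem.Set.contains st.2 item then (st.1, PySem.Set.discard st.2 item)
      else (true, st.2))
    (false, PySem.Set.ofList givenList)).1

-- the for-loop of A, with prev_row/prev_col carried as Options (None at the start)
def pathLoopA (numRows numCols : Int) : List (Int × Int) → Option Int → Option Int → Bool
  | [], _, _ => true
  | (curRow, curCol) :: rest, prevRow, prevCol =>
    if curRow < 0 || curCol < 0 || curRow > numRows - 1 || curCol > numCols - 1 then false
    else
      match prevRow, prevCol with
      | some pr, some pc =>
        if 1 < (curRow - pr).natAbs || 1 < (curCol - pc).natAbs then false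
        else pathLoopA numRows numCols rest (some curRow) (some curCol)
      | _, _ => pathLoopA numRows numCols rest (some curRow) (some curCol)

-- num_rows = len(board), num_cols = len(board[0]) (inlined; board[0] raises IndexError on an
-- empty board in Python — Pre_ excludes that input)
def path_is_legal (path : List (Int × Int)) (board : List (List String)) : Bool :=
  if areThereDuplicates path then false
  else pathLoopA (board.length : Int) ((board.headD []).length : Int) path none none

-- ===== PORT B =====
-- B's single for-loop, carrying the loop state (visited set, prev) through the recursion
def okLoopB (numRows numCols : Int) : List (Int × Int) → PySem.Set (Int × Int) → Option (Int × Int) → Bool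
  | [], _, _ => true
  | (r, c) :: rest, visited, prev =>
    if PySem.Set.contains visited (r, c) then false
    else if !(decide (0 ≤ r) && decide (r < numRows) && decide (0 ≤ c) && decide (c < numCols)) then false
    else if (match prev with
             | some p => decide (1 < (r - p.1).natAbs) || decide (1 < (c - p.2).natAbs)
             | none => false) then false
    else okLoopB numRows numCols rest (PySem.Set.add visited (r, c)) (some (r, c))

-- num_rows/num_cols inlined as in port A; len(board[0]) raises on the empty board (outside Pre_)
def path_is_legal_alt (path : List (Int × Int)) (board : List (List String)) : Bool :=
  okLoopB (board.length : Int) ((board.headD []).length : Int) path PySem.Set.empty none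

-- ===== PRECONDITION & SPEC =====
-- Pre_ excludes only the empty board, on which Python A (and B) raise IndexError at board[0].
def Pre_path_is_legal (path : List (Int × Int)) (board : List (List String)) : Prop := board ≠ []
instance (path : List (Int × Int)) (board : List (List String)) : Decidable (Pre_path_is_legal path board) := by unfold Pre_path_is_legal; infer_instance
def pvWitness_path_is_legal : (List (Int × Int)) × List (List String) := ([(0, 0), (0, 1)], [["a", "b"], ["c", "d"]])

def Spec_path_is_legal (path : List (Int × Int)) (board : List (List String)) (out : Bool) : Prop := out = path_is_legal_alt path board
instance (path : List (Int × Int)) (board : List (List String)) (out : Bool) : Decidable (Spec_path_is_legal path board out) := by unfold Spec_path_is_legal; infer_instance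

-- ===== CLAIM (what is proved, stated in full; the proofs are below) =====
def Claim_equal_path_is_legal : Prop := ∀ (path : List (Int × Int)) (board : List (List String)), Dom_path_is_legal path board → Pre_path_is_legal path board → Spec_path_is_legal path board (path_is_legal path board)

-- ===== LEMMAS AND PROOFS =====

-- the fold of are_there_duplicates, abstracted over its start state
def dupFold (l : List (Int × Int)) (st : Bool × PySem.Set (Int × Int)) : Bool × PySem.Set (Int × Int) :=
  l.foldl
    (fun st item =>
      if PySem.Set.contains st.2 item then (st.1, PySem.Set.discard st.2 item)
      else (true, st.2)) st

theorem dupFold_true (l : List (Int × Int)) (s : PySem.Set (Int × Int)) :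
    (dupFold l (true, s)).1 = true := by
  induction l generalizing s with
  | nil => rfl
  | cons x xs ih =>
    simp only [dupFold, List.foldl_cons]
    split <;> exact ih _

theorem dupFold_false (l : List (Int × Int)) (s : PySem.Set (Int × Int)) :
    (dupFold l (false, s)).1 = false ↔ l.Nodup ∧ ∀ x ∈ l, x ∈ s := by
  induction l generalizing s with
  | nil => simp [dupFold]
  | cons x xs ih =>
    simp only [dupFold, List.foldl_cons]
    by_cases hx : x ∈ s
    · rw [if_pos (by simpa [PySem.Set.contains_iff] using hx)]
      have := ih (PySem.Set.discard s x)
      simp only [dupFold] at this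
      rw [this]
      constructor
      · rintro ⟨hnd, hsub⟩
        refine ⟨List.nodup_cons.2 ⟨fun hxin => ?_, hnd⟩, ?_⟩
        · exact ((PySem.Set.mem_discard _ _ _).1 (hsub x hxin)).2 rfl
        · intro y hy
          rcases List.mem_cons.1 hy with rfl | hy
          · exact hx
          · exact ((PySem.Set.mem_discard _ _ _).1 (hsub y hy)).1
      · rintro ⟨hnd, hsub⟩
        rcases List.nodup_cons.1 hnd with ⟨hxn, hnd'⟩
        refine ⟨hnd', fun y hy => (PySem.Set.mem_discard _ _ _).2 ⟨hsub y (List.mem_cons_of_mem _ hy), ?_⟩⟩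
        rintro rfl; exact hxn hy
    · rw [if_neg (by simpa [PySem.Set.contains_iff] using hx)]
      have ht := dupFold_true xs s
      simp only [dupFold] at ht
      simp only [ht]
      constructor
      · intro h; exact absurd h (by simp)
      · rintro ⟨_, hsub⟩
        exact absurd (hsub x (List.mem_cons_self)) hx

theorem areThereDuplicates_iff (l : List (Int × Int)) :
    areThereDuplicates l = false ↔ l.Nodup := by
  have := dupFold_false l (PySem.Set.ofList l)
  simp only [dupFold] at this
  unfold areThereDuplicates
  rw [this]
  simp [PySem.Set.mem_ofList]

-- the bounds test and adjacency test, as abstract predicates for both characterizations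
def inB (numRows numCols : Int) (rc : Int × Int) : Bool :=
  decide (0 ≤ rc.1) && decide (rc.1 < numRows) && decide (0 ≤ rc.2) && decide (rc.2 < numCols)

def adjB (pq : (Int × Int) × (Int × Int)) : Bool :=
  decide ((pq.1.1 - pq.2.1).natAbs ≤ 1) && decide ((pq.1.2 - pq.2.2).natAbs ≤ 1)

theorem pathLoopA_some (numRows numCols : Int) (l : List (Int × Int)) (p : Int × Int) :
    pathLoopA numRows numCols l (some p.1) (some p.2) =
      (l.all (inB numRows numCols) && ((p :: l).zip l).all adjB) := by
  induction l generalizing p with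
  | nil => rfl
  | cons x xs ih =>
    obtain ⟨r, c⟩ := x
    simp only [pathLoopA, List.zip_cons_cons, List.all_cons]
    by_cases hb : inB numRows numCols (r, c) = true
    · rw [if_neg]
      · by_cases ha : adjB (p, (r, c)) = true
        · rw [if_neg]
          · rw [ih (r, c)]
            simp [hb, ha]
          · simp only [adjB, decide_eq_true_eq, Bool.and_eq_true] at ha
            simp only [Bool.or_eq_true, decide_eq_true_eq]
            omega
        · rw [if_pos]
          · simp [ha]
          · simp only [adjB, decide_eq_true_eq, Bool.and_eq_true] at ha
            simp only [Bool.or_eq_true, decide_eq_true_eq]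
            omega
      · simp only [inB, decide_eq_true_eq, Bool.and_eq_true] at hb
        simp only [Bool.or_eq_true, decide_eq_true_eq]
        omega
    · rw [if_pos]
      · simp [hb]
      · simp only [inB, decide_eq_true_eq, Bool.and_eq_true] at hb
        simp only [Bool.or_eq_true, decide_eq_true_eq]
        omega

theorem pathLoopA_none (numRows numCols : Int) (l : List (Int × Int)) :
    pathLoopA numRows numCols l none none =
      (l.all (inB numRows numCols) && (l.zip l.tail).all adjB) := by
  cases l with
  | nil => rfl
  | cons x xs =>
    obtain ⟨r, c⟩ := x
    simp only [pathLoopA, List.tail_cons, List.all_cons]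
    by_cases hb : inB numRows numCols (r, c) = true
    · rw [if_neg]
      · rw [pathLoopA_some numRows numCols xs (r, c)]
        simp [hb]
      · simp only [inB, decide_eq_true_eq, Bool.and_eq_true] at hb
        simp only [Bool.or_eq_true, decide_eq_true_eq]
        omega
    · rw [if_pos]
      · simp [hb]
      · simp only [inB, decide_eq_true_eq, Bool.and_eq_true] at hb
        simp only [Bool.or_eq_true, decide_eq_true_eq]
        omega

-- characterization of B's fused loop: nodup-and-fresh, bounds, adjacency from prev
theorem okLoopB_char (numRows numCols : Int) (l : List (Int × Int))
    (v : PySem.Set (Int × Int)) (prev : Option (Int × Int)) :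
    okLoopB numRows numCols l v prev =
      (decide (l.Nodup ∧ ∀ x ∈ l, x ∉ v) && l.all (inB numRows numCols) &&
        (match prev with
         | some p => ((p :: l).zip l).all adjB
         | none => (l.zip l.tail).all adjB)) := by
  induction l generalizing v prev with
  | nil => cases prev <;> simp [okLoopB]
  | cons x xs ih =>
    obtain ⟨r, c⟩ := x
    simp only [okLoopB]
    by_cases hv : (r, c) ∈ v
    · rw [if_pos (by simpa [PySem.Set.contains_iff] using hv)]
      have : ¬((r, c) :: xs).Nodup ∨ ¬∀ y ∈ (r, c) :: xs, y ∉ v :=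
        Or.inr (by push_neg; exact ⟨(r, c), List.mem_cons_self, hv⟩)
      cases prev <;> simp_all
    · rw [if_neg (by simpa [PySem.Set.contains_iff] using hv)]
      by_cases hb : inB numRows numCols (r, c) = true
      · rw [if_neg (by simp only [inB] at hb; simp [hb])]
        have hdec : decide (xs.Nodup ∧ ∀ y ∈ xs, y ∉ PySem.Set.add v (r, c)) =
            decide (((r, c) :: xs).Nodup ∧ ∀ y ∈ (r, c) :: xs, y ∉ v) := by
          apply decide_eq_decide.2
          simp only [PySem.Set.mem_add, List.nodup_cons, List.mem_cons]
          constructor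
          · rintro ⟨hnd, hfr⟩
            refine ⟨⟨fun hx => (hfr _ hx (Or.inr rfl)).elim, hnd⟩, ?_⟩
            rintro y (rfl | hy)
            · exact hv
            · exact fun hyv => hfr _ hy (Or.inl hyv)
          · rintro ⟨⟨hxn, hnd⟩, hfr⟩
            refine ⟨hnd, fun y hy => ?_⟩
            rintro (hyv | rfl)
            · exact hfr y (Or.inr hy) hyv
            · exact hxn hy
        cases prev with
        | none =>
          rw [if_neg (by simp)]
          rw [ih (PySem.Set.add v (r, c)) (some (r, c))]
          simp only [hdec, List.tail_cons, List.all_cons, hb]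
          simp [Bool.and_comm, Bool.and_assoc, Bool.and_left_comm]
        | some p =>
          by_cases ha : adjB (p, (r, c)) = true
          · rw [if_neg]
            · rw [ih (PySem.Set.add v (r, c)) (some (r, c))]
              simp only [hdec, List.zip_cons_cons, List.all_cons, hb, ha]
              simp [Bool.and_comm, Bool.and_assoc, Bool.and_left_comm]
            · simp only [adjB, decide_eq_true_eq, Bool.and_eq_true] at ha
              simp only [Bool.or_eq_true, decide_eq_true_eq]
              omega
          · rw [if_pos]
            · simp [List.zip_cons_cons, ha]
            · simp only [adjB, decide_eq_true_eq, Bool.and_eq_true] at ha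
              simp only [Bool.or_eq_true, decide_eq_true_eq]
              omega
      · rw [if_pos (by simp only [inB] at hb; simp at hb ⊢; omega)]
        cases prev <;> simp [hb]

-- ===== VERDICT (by name: the statement is the Claim_ definition above) =====
theorem path_is_legal_spec : Claim_equal_path_is_legal := by
  intro path board _ _
  unfold Spec_path_is_legal path_is_legal path_is_legal_alt
  rw [okLoopB_char]
  simp only [PySem.Set.empty]
  by_cases hd : path.Nodup
  · rw [if_neg (by rw [← Bool.not_eq_false]; simpa using (areThereDuplicates_iff path).2 hd)]
    rw [pathLoopA_none]
    simp [hd]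
  · rw [if_pos (by rw [← Bool.not_eq_false]; simpa [areThereDuplicates_iff] using hd)]
    simp [hd]
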